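-- pv_equiv track=rewrite | github.com/bigdatachobo/Study | Coding_Test/BAEKJOON_ONLINE_JUDGE/1668번_트로피_진열.py | up_count
-- ===== SOURCE A (Python) =====
-- def up_count(array):
--     now=array[0]
--     result = 1
--     for i in range(1,len(array)):
--         if now < array[i]:
--             result += 1
--             now = array[i]
--     return result
-- ===== SOURCE B (Python) =====
-- def up_count(array):
--     # Materialize the prefix-maximum sequence, then count its strict ascents in a second pass.
--     prefix = []
--     for x in array:
--         prefix.append(x if not prefix or x > prefix[-1] else prefix[-1])
--     return 1 + sum(1 for p, q in zip(prefix, prefix[1:]) if p < q)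
-- ===== Notes on version B (the rewrite author's own statement) =====
-- stated objective: alternative
-- what changed: Instead of tracking one running-max scalar and incrementing a counter inline, B materializes the whole prefix-maximum list and then counts its strict adjacent ascents in a separate zip pass (plus one).
import Mathlib
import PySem

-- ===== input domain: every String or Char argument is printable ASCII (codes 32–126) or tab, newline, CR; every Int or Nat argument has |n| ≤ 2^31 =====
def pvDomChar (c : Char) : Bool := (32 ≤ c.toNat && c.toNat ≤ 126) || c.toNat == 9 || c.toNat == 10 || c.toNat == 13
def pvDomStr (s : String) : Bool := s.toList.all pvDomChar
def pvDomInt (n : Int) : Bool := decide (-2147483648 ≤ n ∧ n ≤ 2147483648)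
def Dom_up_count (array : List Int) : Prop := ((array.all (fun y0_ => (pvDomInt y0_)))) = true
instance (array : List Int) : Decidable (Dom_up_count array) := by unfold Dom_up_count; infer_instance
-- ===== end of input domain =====

-- B keeps the whole prefix-maximum list and counts its strict adjacent ascents in a second pass;
-- same O(n) cost, different decomposition. Equivalence is about the return value only.

-- ===== PORT A =====
def up_count (array : List Int) : Int :=
  match PySem.List.pyGet? array 0 with
  | none => 0   -- array[0] raises IndexError on []; excluded by Pre_up_count
  | some now0 =>
    (((PySem.List.pyRange 1 (array.length : Int) 1).foldl
        (fun (st : Int × Int) i =>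
          if st.1 < PySem.List.pyGetD array i 0 then (PySem.List.pyGetD array i 0, st.2 + 1) else st)
        (now0, 1))).2

-- ===== PORT B =====
def up_count_alt (array : List Int) : Int :=
  let pre := array.foldl
    (fun (p : List Int) x =>
      p ++ [match PySem.List.pyGet? p (-1) with   -- 'x if not prefix or x > prefix[-1] else prefix[-1]'
            | none => x
            | some last => if x > last then x else last])
    []
  -- 'prefix[1:]' is pre.tail (PySem.List.slice_from_one); sum(1 for …) is a fold over the zip
  1 + (List.zip pre pre.tail).foldl (fun (acc : Int) pq => if pq.1 < pq.2 then acc + 1 else acc) 0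

-- ===== PRECONDITION & SPEC =====
-- Pre_ excludes only the empty list, on which A raises IndexError (array[0]).
def Pre_up_count (array : List Int) : Prop := array ≠ []
instance (array : List Int) : Decidable (Pre_up_count array) := by unfold Pre_up_count; infer_instance
def pvWitness_up_count : List Int := ([1, 3, 2, 5])

def Spec_up_count (array : List Int) (out : Int) : Prop := out = up_count_alt array
instance (array : List Int) (out : Int) : Decidable (Spec_up_count array out) := by unfold Spec_up_count; infer_instance

-- ===== CLAIM (what is proved, stated in full; the proofs are below) =====
def Claim_equal_up_count : Prop := ∀ (array : List Int), Dom_up_count array → Pre_up_count array → Spec_up_count array (up_count array)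

-- ===== LEMMAS AND PROOFS =====

-- the prefix-maximum tail produced from current maximum m
def pvPm (m : Int) : List Int → List Int
  | [] => []
  | x :: xs => (if x > m then x else m) :: pvPm (if x > m then x else m) xs

-- adjacent strict-ascent count
def pvCnt : List Int → Int
  | a :: b :: t => (if a < b then 1 else 0) + pvCnt (b :: t)
  | _ => 0

lemma pvStep (p : List Int) (m x : Int) (h : p.getLast? = some m) :
    (p ++ [match PySem.List.pyGet? p (-1) with
           | none => x
           | some last => if x > last then x else last])
      = p ++ [if x > m then x else m] := by
  rw [PySem.List.pyGet?_neg_one, h]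

lemma pvBuild (l : List Int) : ∀ (p : List Int) (m : Int), p.getLast? = some m →
    l.foldl (fun (p : List Int) x =>
      p ++ [match PySem.List.pyGet? p (-1) with
            | none => x
            | some last => if x > last then x else last]) p = p ++ pvPm m l := by
  induction l with
  | nil => intro p m _; simp [pvPm]
  | cons x xs ih =>
    intro p m h
    simp only [List.foldl_cons, pvStep p m x h, pvPm]
    rw [ih (p ++ [if x > m then x else m]) (if x > m then x else m) (by simp)]
    simp

lemma pvZipCnt (l : List Int) : ∀ (acc : Int),
    (List.zip l l.tail).foldl (fun (acc : Int) pq => if pq.1 < pq.2 then acc + 1 else acc) acc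
      = acc + pvCnt l := by
  induction l with
  | nil => intro acc; simp [pvCnt]
  | cons a t ih =>
    intro acc
    cases t with
    | nil => simp [pvCnt]
    | cons b t' =>
      simp only [List.tail_cons, List.zip_cons_cons, List.foldl_cons]
      rw [show (List.zip (b :: t') t' : List (Int × Int)) = List.zip (b :: t') (b :: t').tail from rfl]
      rw [ih]
      simp only [pvCnt]
      split_ifs <;> omega

lemma pvMain (rest : List Int) : ∀ (m c : Int),
    (rest.foldl (fun (st : Int × Int) ai =>
        if st.1 < ai then (ai, st.2 + 1) else st) (m, c)).2
      = c + pvCnt (m :: pvPm m rest) := by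
  induction rest with
  | nil => intro m c; simp [pvPm, pvCnt]
  | cons x xs ih =>
    intro m c
    simp only [List.foldl_cons, pvPm, pvCnt, gt_iff_lt]
    by_cases h : m < x
    · simp only [if_pos h, ih]
      omega
    · simp only [if_neg h, ih]
      omega

lemma pvA_fold (array : List Int) (m c : Int) :
    (PySem.List.pyRange 1 (array.length : Int) 1).foldl
        (fun (st : Int × Int) i =>
          if st.1 < PySem.List.pyGetD array i 0 then (PySem.List.pyGetD array i 0, st.2 + 1) else st)
        (m, c)
      = (array.drop 1).foldl (fun (st : Int × Int) ai =>
          if st.1 < ai then (ai, st.2 + 1) else st) (m, c) := by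
  exact PySem.List.foldl_pyRange_pyGetD (a := 1)
    (f := fun (st : Int × Int) ai => if st.1 < ai then (ai, st.2 + 1) else st)
    (xs := array) (d := 0) (init := (m, c)) (by norm_num)

-- ===== VERDICT (by name: the statement is the Claim_ definition above) =====
theorem up_count_spec : Claim_equal_up_count := by
  intro array _ hpre
  unfold Spec_up_count up_count up_count_alt
  cases array with
  | nil => exact absurd rfl hpre
  | cons a rest =>
    simp only [List.foldl_cons]
    rw [show ([] : List Int) ++ [match PySem.List.pyGet? ([] : List Int) (-1) with
          | none => a | some last => if a > last then a else last] = [a] from by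
        simp [PySem.List.pyGet?]]
    rw [pvBuild rest [a] a (by simp)]
    rw [PySem.List.pyGet?_zero]
    simp only [List.getElem?_cons_zero]
    rw [pvA_fold]
    simp only [List.drop_one, List.tail_cons]
    rw [pvMain, pvZipCnt, List.singleton_append]
    omega
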